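-- pv_equiv track=rewrite | github.com/H-Shen/UCalgary_Archive | CPSC_231_F2018/assignment_4/HaohuShen_Evil_Hangman.py | word_family_obtain
-- ===== SOURCE A (Python) =====
-- def word_family_obtain(word_list, guess_character):
--     """
--     Partiton word_list according to the position and frequency that
--     guess_character appears. Return a dict whose keys are tuples saving
--     the indices of guess_character and whose values are lists of words
--     that satisfies the corresponding patterns.
--     """
--
--     collections = dict()
--     for word in word_list:
--         position = list()
--         for j in range(len(word)):
--             if word[j] == guess_character:
--                 position.append(j)
--         position = tuple(position)
--         if not position in collections:
--             collections[position] = [word]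
--         else:
--             collections[position].append(word)
--     return collections
-- ===== SOURCE B (Python) =====
-- def word_family_obtain(word_list, guess_character):
--     """Group-by-filter re-implementation: compute each word's pattern key once,
--     dedup the keys in first-appearance order, then build each bucket by filtering."""
--     def key(word):
--         return tuple(i for i, ch in enumerate(word) if ch == guess_character)
--     keys = list(dict.fromkeys(key(w) for w in word_list))
--     return {k: [w for w in word_list if key(w) == k] for k in keys}
-- ===== Notes on version B (the rewrite author's own statement) =====
-- stated objective: simpler
-- what changed: Replaces A's incremental dict-bucketing (mutating per-key lists while scanning once) by a two-pass group-by-filter: compute each word's index-pattern key, dedup the keys in first-appearance order, then build each bucket by filtering the word list per key.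
import Mathlib
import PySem

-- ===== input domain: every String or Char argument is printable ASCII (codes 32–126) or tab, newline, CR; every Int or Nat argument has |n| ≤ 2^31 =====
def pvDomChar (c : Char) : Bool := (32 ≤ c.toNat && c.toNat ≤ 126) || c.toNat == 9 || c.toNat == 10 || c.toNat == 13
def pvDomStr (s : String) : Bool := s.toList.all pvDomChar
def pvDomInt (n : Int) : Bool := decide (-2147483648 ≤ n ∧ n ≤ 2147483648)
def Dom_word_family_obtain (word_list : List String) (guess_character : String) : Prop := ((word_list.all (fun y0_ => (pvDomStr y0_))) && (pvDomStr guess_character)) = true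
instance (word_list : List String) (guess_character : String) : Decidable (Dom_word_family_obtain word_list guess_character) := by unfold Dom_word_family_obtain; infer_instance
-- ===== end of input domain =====

-- B replaces A's incremental dict-bucketing by a two-pass group-by-filter (dedup the
-- pattern keys in first-appearance order, then filter the list once per key): simpler code,
-- same return value (the association list is equal exactly, including order).

-- ===== PORT A =====
-- 'word[j] == guess_character': word[j] is a 1-char string; j comes from range(len(word)),
-- so the none case of pyGet? is unreachable.
def pvEqChar (oc : Option Char) (g : List Char) : Bool :=
  match oc with
  | some c => [c] == g
  | none => false

-- the inner 'for j in range(len(word)): if word[j] == guess_character: position.append(j)'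
def pvPositionsA (cs : List Char) (g : List Char) : List Int :=
  (PySem.List.pyRange 0 (PySem.Chars.len cs) 1).foldl
    (fun position j => if pvEqChar (PySem.Chars.pyGet? cs j) g then position ++ [j] else position) []

def word_family_obtain (word_list : List String) (guess_character : String) : List (List Int × List String) :=
  (word_list.foldl
    (fun (collections : PySem.Dict (List Int) (List String)) word =>
      let position := pvPositionsA word.toList guess_character.toList
      if collections.contains position = false then
        collections.insert position [word]
      else
        collections.modify position [] (fun l => l ++ [word]))
    PySem.Dict.empty).items

-- ===== PORT B =====
-- key(word) = tuple(i for i, ch in enumerate(word) if ch == guess_character)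
def pvKeyB (word : String) (guess_character : String) : List Int :=
  ((PySem.List.enumerate word.toList).filter
      (fun p => [p.2] == guess_character.toList)).map (fun p => p.1)

def word_family_obtain_alt (word_list : List String) (guess_character : String) : List (List Int × List String) :=
  let keys := PySem.List.dedup (word_list.map (fun w => pvKeyB w guess_character))
  keys.map (fun k => (k, word_list.filter (fun w => pvKeyB w guess_character == k)))

-- ===== PRECONDITION & SPEC =====
def Spec_word_family_obtain (word_list : List String) (guess_character : String) (out : List (List Int × List String)) : Prop := out = word_family_obtain_alt word_list guess_character
instance (word_list : List String) (guess_character : String) (out : List (List Int × List String)) : Decidable (Spec_word_family_obtain word_list guess_character out) := by unfold Spec_word_family_obtain; infer_instance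

-- ===== CLAIM (what is proved, stated in full; the proofs are below) =====
def Claim_equal_word_family_obtain : Prop := ∀ (word_list : List String) (guess_character : String), Dom_word_family_obtain word_list guess_character → Spec_word_family_obtain word_list guess_character (word_family_obtain word_list guess_character)

-- ===== LEMMAS AND PROOFS =====

-- B's enumerate-comprehension, with a running start index, seen as a filter of range indices
lemma pv_enum_filter (g : List Char) :
    ∀ (cs : List Char) (s : Int),
      ((PySem.List.enumerate cs s).filter (fun p => [p.2] == g)).map (fun p => p.1)
        = ((List.range cs.length).filter (fun k => pvEqChar cs[k]? g)).map (fun (k : Nat) => s + (k : Int)) := by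
  intro cs
  induction cs with
  | nil => intro s; simp [PySem.List.enumerate]
  | cons c t ih =>
    intro s
    rw [PySem.List.enumerate_cons]
    by_cases h : ([c] == g) = true
    · simp only [List.length_cons, List.range_succ_eq_map, List.filter_cons, pvEqChar,
        List.getElem?_cons_zero, List.getElem?_cons_succ, List.filter_map, List.map_map,
        Function.comp_def, h, if_true, List.map_cons, ih (s + 1)]
      refine List.cons_eq_cons.mpr ⟨by omega, ?_⟩
      apply List.map_congr_left
      intro k _
      push_cast
      ring
    · simp only [List.length_cons, List.range_succ_eq_map, List.filter_cons, pvEqChar,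
        List.getElem?_cons_zero, List.getElem?_cons_succ, List.filter_map, List.map_map,
        Function.comp_def, h, if_false, Bool.false_eq_true, ih (s + 1)]
      apply List.map_congr_left
      intro k _
      push_cast
      ring

-- A's inner index loop computes exactly B's key
lemma pv_key_eq (w g : String) : pvPositionsA w.toList g.toList = pvKeyB w g := by
  unfold pvPositionsA pvKeyB
  have hlen : PySem.Chars.len w.toList = (w.toList.length : Int) := by
    simp [PySem.Chars.len]
  rw [hlen, PySem.List.pyRange_zero_nat, List.foldl_map,
    PySem.List.foldl_append_if (p := fun k : Nat => pvEqChar (PySem.Chars.pyGet? w.toList (k : Int)) g.toList)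
      (f := fun k : Nat => (k : Int))]
  rw [pv_enum_filter g.toList w.toList 0]
  simp [PySem.List.pyGet?_natCast, PySem.Chars.pyGet?]

-- A's branch pair is exactly one dict 'modify'
lemma pv_body_eq (d : PySem.Dict (List Int) (List String)) (p : List Int) (w : String) :
    (if d.contains p = false then d.insert p [w] else d.modify p [] (fun l => l ++ [w]))
      = d.modify p [] (fun l => l ++ [w]) := by
  by_cases h : d.contains p = true
  · simp [h]
  · have h' : d.contains p = false := by simpa using h
    simp only [h', if_true, PySem.Dict.modify]
    rw [PySem.Dict.getD_of_not_contains d [] h', List.nil_append]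

-- ===== VERDICT (by name: the statement is the Claim_ definition above) =====
theorem word_family_obtain_spec : Claim_equal_word_family_obtain := by
  intro word_list guess_character _
  unfold Spec_word_family_obtain word_family_obtain word_family_obtain_alt
  set key : String → List Int := fun w => pvKeyB w guess_character with hkey
  have hpos : ∀ w : String, pvPositionsA w.toList guess_character.toList = key w :=
    fun w => pv_key_eq w guess_character
  -- rewrite A's loop to a pure modify-loop keyed by `key`
  have hloop :
      word_list.foldl
        (fun (collections : PySem.Dict (List Int) (List String)) word =>
          let position := pvPositionsA word.toList guess_character.toList
          if collections.contains position = false then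
            collections.insert position [word]
          else
            collections.modify position [] (fun l => l ++ [word]))
        PySem.Dict.empty
      = word_list.foldl
          (fun (d : PySem.Dict (List Int) (List String)) w =>
            d.modify (key w) [] (fun l => l ++ [w]))
          PySem.Dict.empty := by
    apply PySem.List.foldl_congr_mem
    intro d w _
    simp only [hpos w, pv_body_eq]
  rw [hloop]
  set d := word_list.foldl
      (fun (d : PySem.Dict (List Int) (List String)) w =>
        d.modify (key w) [] (fun l => l ++ [w]))
      PySem.Dict.empty with hd
  have hkeys : d.keys = PySem.Set.ofList (word_list.map key) := by
    rw [hd, PySem.Dict.keys_foldl_modify_key (key := key) (d0 := [])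
      (f := fun _ w => fun l => l ++ [w])]
    simp [PySem.Set.update, PySem.Set.ofList_eq_foldl, PySem.Dict.keys_empty]
  have hnodup : d.keys.Nodup := by
    rw [hd]
    exact PySem.Dict.nodup_keys_foldl_modify_key _ key [] (fun _ w => fun l => l ++ [w]) _
      (by simp [PySem.Dict.keys_empty])
  have hgetD : ∀ c : List Int,
      d.getD c [] = word_list.filter (fun w => key w == c) := by
    intro c
    have hmap : d = (word_list.map (fun w => (key w, w))).foldl
        (fun (d : PySem.Dict (List Int) (List String)) p =>
          d.modify p.1 [] (fun l => l ++ [p.2]))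
        PySem.Dict.empty := by
      rw [hd, List.foldl_map]
    rw [hmap, PySem.Dict.getD_foldl_modify_append]
    simp [PySem.Dict.getD_empty, List.filter_map, List.map_map, Function.comp_def]
  rw [PySem.Dict.items_eq_map_keys d hnodup [], hkeys]
  simp only [PySem.List.dedup_eq_ofList]
  apply List.map_congr_left
  intro k _
  rw [hgetD k]
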